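-- pv_equiv track=rewrite | github.com/adam-d-wood/Reversi | minimax2.py | count_frontiers
-- ===== SOURCE A (Python) =====
-- def count_frontiers(field):
--     black, red = 0, 0
--     for i in range(len(field)):
--         for j in range(len(field[0])):
--             if field[i][j] != 0:
--                 surrounds = [(0,1), (0,-1), (-1,0), (1,0)]
--                 frontier = False
--                 for s in surrounds:
--                     cell = [i+s[0], j+s[1]]
--                     if on_board(cell) and field[cell[0]][cell[1]] == 0:
--                         frontier = True
--                 if frontier:
--                     if field[i][j] == 1: black += 1
--                     else: red += 1
--     return black
--
-- def on_board(cell):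
-- 	valid = True
-- 	for coord in cell:
-- 		if not(0<=coord<8):
-- 			valid = False
-- 	return valid
-- ===== SOURCE B (Python) =====
-- def on_board(cell):
--     return all(0 <= c < 8 for c in cell)
--
--
-- def count_frontiers(field):
--     height = len(field)
--     width = len(field[0]) if field else 0
--     frontier = set()
--     for di, dj in ((0, 1), (0, -1), (-1, 0), (1, 0)):
--         frontier |= {(i, j)
--                      for i in range(height) for j in range(width)
--                      if field[i][j] != 0
--                      and on_board([i + di, j + dj])
--                      and field[i + di][j + dj] == 0}
--     return sum(1 for i, j in frontier if field[i][j] == 1)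
-- ===== Notes on version B (the rewrite author's own statement) =====
-- stated objective: alternative
-- what changed: B computes the frontier as a set by four direction-major sweeps (one pass per shift direction collecting every disc with an empty on-board cell on that side) and then counts the black members of the set, instead of A's cell-major scan that loops over the four offsets per disc with a frontier flag and two running counters; Pre_ excludes exactly the boards on which A raises IndexError.
import Mathlib
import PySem

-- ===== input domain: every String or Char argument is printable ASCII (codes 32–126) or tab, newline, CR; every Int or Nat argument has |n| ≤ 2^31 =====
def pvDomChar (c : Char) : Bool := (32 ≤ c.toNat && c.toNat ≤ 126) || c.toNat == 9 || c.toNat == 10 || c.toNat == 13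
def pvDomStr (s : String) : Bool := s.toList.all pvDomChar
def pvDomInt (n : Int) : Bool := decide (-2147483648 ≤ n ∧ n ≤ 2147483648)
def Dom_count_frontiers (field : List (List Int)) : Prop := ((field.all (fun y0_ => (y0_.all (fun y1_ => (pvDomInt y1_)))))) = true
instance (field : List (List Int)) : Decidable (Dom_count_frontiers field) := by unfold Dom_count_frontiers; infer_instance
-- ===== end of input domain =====

-- B builds the frontier as a SET by four direction-major sweeps and then counts its black
-- members, instead of A's cell-major scan with a per-disc flag and two counters ("alternative", not faster).

-- ===== PORT A =====
def onBoard (cell : List Int) : Bool :=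
  cell.foldl (fun valid coord => if !(decide (0 ≤ coord) && decide (coord < 8)) then false else valid) true

def count_frontiers (field : List (List Int)) : Int :=
  ((List.range field.length).foldl (fun (acc : Int × Int) i =>
    (List.range (field.headD []).length).foldl (fun (acc : Int × Int) j =>
      if (field.getD i []).getD j 0 ≠ 0 then
        let surrounds : List (Int × Int) := [(0, 1), (0, -1), (-1, 0), (1, 0)]
        let frontier := surrounds.foldl (fun f s =>
          let cell : List Int := [(i : Int) + s.1, (j : Int) + s.2]
          if onBoard cell && ((field.getD ((i : Int) + s.1).toNat []).getD ((j : Int) + s.2).toNat 0 == 0)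
          then true else f) false
        if frontier then
          (if (field.getD i []).getD j 0 == 1 then (acc.1 + 1, acc.2) else (acc.1, acc.2 + 1))
        else acc
      else acc) acc) ((0 : Int), (0 : Int))).1

-- ===== PORT B =====
def on_board_alt (cell : List Int) : Bool :=
  cell.all (fun c => decide (0 ≤ c) && decide (c < 8))

-- the condition of Source B's set comprehension for one shift direction d.
-- The neighbour read field[i+di][j+dj] is totalised with default 1 ('not empty'): inside
-- Pre_ the read is always in structure (where Python B would raise, B's port claims nothing).
def condB (field : List (List Int)) (d : Int × Int) (i j : Nat) : Bool :=
  !((field.getD i []).getD j 0 == 0) &&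
  on_board_alt [(i : Int) + d.1, (j : Int) + d.2] &&
  ((field.getD ((i : Int) + d.1).toNat []).getD ((j : Int) + d.2).toNat 1 == 0)

-- one sweep of Source B: the discs with an empty on-board cell on side d, in scan order
def dirList (field : List (List Int)) (d : Int × Int) : List (Int × Int) :=
  (List.range field.length).flatMap (fun i =>
    ((List.range (field.headD []).length).filter (fun j => condB field d i j)).map
      (fun (j : Nat) => ((i : Int), (j : Int))))

-- Source B's loop: frontier |= {…} over the four directions
def frontierSet (field : List (List Int)) : PySem.Set (Int × Int) :=
  ([(0, 1), (0, -1), (-1, 0), (1, 0)] : List (Int × Int)).foldl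
    (fun fr d => PySem.Set.union fr (PySem.Set.ofList (dirList field d))) PySem.Set.empty

def count_frontiers_alt (field : List (List Int)) : Int :=
  (((frontierSet field).filter
      (fun p => (field.getD p.1.toNat []).getD p.2.toNat 0 == 1)).length : Int)

-- ===== PRECONDITION & SPEC =====
-- Pre_ is exactly the set of inputs on which A returns (raises no IndexError): every row is at
-- least as long as row 0, and every on-board (0..7) orthogonal neighbour of a non-zero cell of
-- the scanned rectangle actually exists in the (possibly ragged, possibly non-8×8) list structure.
def nbSafe (field : List (List Int)) (a b : Nat) : Prop :=
  a < 8 → b < 8 → (a < field.length ∧ b < (field.getD a []).length)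

def Pre_count_frontiers (field : List (List Int)) : Prop :=
  (∀ i, i < field.length → (field.headD []).length ≤ (field.getD i []).length) ∧
  (∀ i, i < field.length → ∀ j, j < (field.headD []).length →
    (field.getD i []).getD j 0 ≠ 0 →
      nbSafe field (i + 1) j ∧ (0 < i → nbSafe field (i - 1) j) ∧
      nbSafe field i (j + 1) ∧ (0 < j → nbSafe field i (j - 1)))

instance (field : List (List Int)) : Decidable (Pre_count_frontiers field) := by
  unfold Pre_count_frontiers nbSafe
  exact instDecidableAnd
    (dq := @Nat.decidableBallLT _ _ (fun i hi => @Nat.decidableBallLT _ _ (fun j hj => by infer_instance)))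

def pvWitness_count_frontiers : List (List Int) := [[0, 0], [0, 0]]

def Spec_count_frontiers (field : List (List Int)) (out : Int) : Prop := out = count_frontiers_alt field
instance (field : List (List Int)) (out : Int) : Decidable (Spec_count_frontiers field out) := by unfold Spec_count_frontiers; infer_instance

-- ===== CLAIM (what is proved, stated in full; the proofs are below) =====
def Claim_equal_count_frontiers : Prop := ∀ (field : List (List Int)), Dom_count_frontiers field → Pre_count_frontiers field → Spec_count_frontiers field (count_frontiers field)

-- ===== LEMMAS AND PROOFS =====
-- notation-level helpers for the proofs
def gval (field : List (List Int)) (i j : Nat) : Int := (field.getD i []).getD j 0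

def pairC (i j : Nat) : Int × Int := ((i : Int), (j : Int))

def afront (field : List (List Int)) (i j : Nat) : Bool :=
  ([(0, 1), (0, -1), (-1, 0), (1, 0)] : List (Int × Int)).any (fun s =>
    onBoard [(i : Int) + s.1, (j : Int) + s.2] &&
    ((field.getD ((i : Int) + s.1).toNat []).getD ((j : Int) + s.2).toNat 0 == 0))

def pA (field : List (List Int)) (i j : Nat) : Bool :=
  !((field.getD i []).getD j 0 == 0) && afront field i j && ((field.getD i []).getD j 0 == 1)

-- generic loop-shape lemmas
theorem foldl_or_shape {α : Type} (l : List α) (c : α → Bool) (b : Bool) :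
    l.foldl (fun f s => if c s then true else f) b = (b || l.any c) := by
  induction l generalizing b with
  | nil => simp
  | cons x xs ih => simp only [List.foldl_cons, List.any_cons, ih]; cases c x <;> simp

theorem foldl_fst_add {α : Type} (l : List α) (step : Int × Int → α → Int × Int)
    (v : α → Int) (h : ∀ acc x, (step acc x).1 = acc.1 + v x) (acc : Int × Int) :
    (l.foldl step acc).1 = acc.1 + (l.map v).sum := by
  induction l generalizing acc with
  | nil => simp
  | cons x xs ih => simp only [List.foldl_cons, List.map_cons, List.sum_cons, ih, h]; ring

theorem pA_true_iff (field : List (List Int)) (i j : Nat) :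
    pA field i j = true ↔ ((field.getD i []).getD j 0 = 1 ∧ afront field i j = true) := by
  simp only [pA, Bool.and_eq_true, Bool.not_eq_true', beq_iff_eq, beq_eq_false_iff_ne, ne_eq]
  constructor
  · rintro ⟨⟨_, ha⟩, h1⟩; exact ⟨h1, ha⟩
  · rintro ⟨h1, ha⟩; exact ⟨⟨by rw [h1]; norm_num, ha⟩, h1⟩

theorem innerstep_fst (field : List (List Int)) (i j : Nat) (acc : Int × Int) :
    (if (field.getD i []).getD j 0 ≠ 0 then
       (if ([(0, 1), (0, -1), (-1, 0), (1, 0)] : List (Int × Int)).foldl (fun f s =>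
            if onBoard [(i : Int) + s.1, (j : Int) + s.2] &&
               ((field.getD ((i : Int) + s.1).toNat []).getD ((j : Int) + s.2).toNat 0 == 0)
            then true else f) false
        then (if (field.getD i []).getD j 0 == 1 then (acc.1 + 1, acc.2) else (acc.1, acc.2 + 1))
        else acc)
     else acc).1 = acc.1 + (if pA field i j then (1 : Int) else 0) := by
  rw [foldl_or_shape]
  by_cases hg : (field.getD i []).getD j 0 = 0
  · rw [if_neg (not_not_intro hg)]
    have hp : pA field i j = false := by
      apply Bool.eq_false_iff.mpr
      intro hc
      exact absurd ((pA_true_iff field i j).mp hc).1 (by rw [hg]; norm_num)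
    rw [if_neg (by rw [hp]; simp)]
    ring
  · rw [if_pos hg]
    simp only [Bool.false_or]
    by_cases hf : afront field i j = true
    · rw [if_pos (by exact hf)]
      by_cases h1 : (field.getD i []).getD j 0 = 1
      · rw [if_pos (beq_iff_eq.mpr h1), if_pos ((pA_true_iff field i j).mpr ⟨h1, hf⟩)]
      · rw [if_neg (fun hc => h1 (beq_iff_eq.mp hc)),
            if_neg (fun hc => h1 ((pA_true_iff field i j).mp hc).1)]
        ring
    · rw [if_neg (by exact hf), if_neg (fun hc => hf ((pA_true_iff field i j).mp hc).2)]
      ring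

-- A's value: sum over the grid of the 0/1 indicator pA
theorem countA_eq (field : List (List Int)) :
    count_frontiers field =
      ((List.range field.length).map (fun i =>
        ((List.range (field.headD []).length).map (fun j =>
          if pA field i j then (1 : Int) else 0)).sum)).sum := by
  simp only [count_frontiers]
  rw [foldl_fst_add _ _ (fun i =>
    ((List.range (field.headD []).length).map (fun j => if pA field i j then (1 : Int) else 0)).sum)
    (fun acc i =>
      foldl_fst_add _ _ (fun j => if pA field i j then (1 : Int) else 0)
        (fun acc2 j => innerstep_fst field i j acc2) acc)
    ((0 : Int), (0 : Int))]
  simp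

theorem onBoard_pair_iff (x y : Int) :
    onBoard [x, y] = true ↔ (0 ≤ x ∧ x < 8 ∧ 0 ≤ y ∧ y < 8) := by
  simp only [onBoard, List.foldl_cons, List.foldl_nil]
  split_ifs <;> simp_all <;> omega

theorem on_board_alt_pair_iff (x y : Int) :
    on_board_alt [x, y] = true ↔ (0 ≤ x ∧ x < 8 ∧ 0 ≤ y ∧ y < 8) := by
  simp [on_board_alt, and_assoc]

-- inside Pre_, the on-board neighbour of a non-zero rectangle cell exists in the structure
theorem nb_in_struct (field : List (List Int)) (hpre : Pre_count_frontiers field)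
    (i j : Nat) (him : i < field.length) (hjw : j < (field.headD []).length)
    (hnz : (field.getD i []).getD j 0 ≠ 0)
    (d : Int × Int) (hd : d ∈ ([(0, 1), (0, -1), (-1, 0), (1, 0)] : List (Int × Int)))
    (hob : (0 : Int) ≤ (i : Int) + d.1 ∧ (i : Int) + d.1 < 8 ∧
           (0 : Int) ≤ (j : Int) + d.2 ∧ (j : Int) + d.2 < 8) :
    ((i : Int) + d.1).toNat < field.length ∧
    ((j : Int) + d.2).toNat < (field.getD ((i : Int) + d.1).toNat []).length := by
  obtain ⟨hS1, hS2, hS3, hS4⟩ := hpre.2 i him j hjw hnz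
  simp only [List.mem_cons, List.not_mem_nil, or_false] at hd
  rcases hd with rfl | rfl | rfl | rfl
  · -- d = (0, 1)
    obtain ⟨h1, h2⟩ := hS3 (by simp only [] at hob ⊢; omega) (by simp only [] at hob ⊢; omega)
    constructor
    · simp only []; omega
    · have e : (((i : Int) + (0, 1).1).toNat) = i := by simp only []; omega
      rw [e]
      simp only [] at h2 ⊢
      omega
  · -- d = (0, -1)
    have hj0 : 0 < j := by simp only [] at hob; omega
    obtain ⟨h1, h2⟩ := hS4 hj0 (by simp only [] at hob ⊢; omega) (by simp only [] at hob ⊢; omega)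
    constructor
    · simp only []; omega
    · have e : (((i : Int) + (0, -1).1).toNat) = i := by simp only []; omega
      rw [e]
      simp only [] at h2 ⊢
      omega
  · -- d = (-1, 0)
    have hi0 : 0 < i := by simp only [] at hob; omega
    obtain ⟨h1, h2⟩ := hS2 hi0 (by simp only [] at hob ⊢; omega) (by simp only [] at hob ⊢; omega)
    constructor
    · simp only []; omega
    · have e : (((i : Int) + (-1, 0).1).toNat) = i - 1 := by simp only []; omega
      rw [e]
      simp only [] at h2 ⊢
      omega
  · -- d = (1, 0)
    obtain ⟨h1, h2⟩ := hS1 (by simp only [] at hob ⊢; omega) (by simp only [] at hob ⊢; omega)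
    constructor
    · simp only []; omega
    · have e : (((i : Int) + (1, 0).1).toNat) = i + 1 := by simp only []; omega
      rw [e]
      simp only [] at h2 ⊢
      omega

-- a read that is in structure does not see its default
theorem read_default_irrelevant (field : List (List Int)) (a b : Nat)
    (hb : b < (field.getD a []).length) (d1 d2 : Int) :
    (field.getD a []).getD b d1 = (field.getD a []).getD b d2 := by
  rw [List.getD_eq_getElem _ _ hb, List.getD_eq_getElem _ _ hb]

-- under Pre_, Source B's sweep condition over the four directions is A's frontier test
theorem condB_exists_iff (field : List (List Int)) (hpre : Pre_count_frontiers field)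
    (i j : Nat) (him : i < field.length) (hjw : j < (field.headD []).length) :
    (∃ d ∈ ([(0, 1), (0, -1), (-1, 0), (1, 0)] : List (Int × Int)), condB field d i j = true) ↔
    ((field.getD i []).getD j 0 ≠ 0 ∧ afront field i j = true) := by
  unfold afront
  rw [List.any_eq_true]
  constructor
  · rintro ⟨d, hd, hc⟩
    unfold condB at hc
    simp only [Bool.and_eq_true, Bool.not_eq_true', beq_eq_false_iff_ne, ne_eq, beq_iff_eq] at hc
    obtain ⟨⟨hnz, hob⟩, hrd⟩ := hc
    rw [on_board_alt_pair_iff] at hob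
    obtain ⟨ha, hb⟩ := nb_in_struct field hpre i j him hjw hnz d hd hob
    refine ⟨hnz, d, hd, ?_⟩
    rw [Bool.and_eq_true]
    refine ⟨?_, beq_iff_eq.mpr ?_⟩
    · rw [onBoard_pair_iff]; exact hob
    · rw [read_default_irrelevant field _ _ hb 0 1]; exact hrd
  · rintro ⟨hnz, d, hd, hc⟩
    rw [Bool.and_eq_true] at hc
    obtain ⟨hob, hrd⟩ := hc
    rw [onBoard_pair_iff] at hob
    replace hrd := beq_iff_eq.mp hrd
    obtain ⟨ha, hb⟩ := nb_in_struct field hpre i j him hjw hnz d hd hob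
    refine ⟨d, hd, ?_⟩
    unfold condB
    simp only [Bool.and_eq_true, Bool.not_eq_true', beq_eq_false_iff_ne, ne_eq, beq_iff_eq]
    refine ⟨⟨hnz, ?_⟩, ?_⟩
    · rw [on_board_alt_pair_iff]; exact hob
    · rw [read_default_irrelevant field _ _ hb 1 0]; exact hrd

-- generic lemmas about folds that only grow the set
theorem mem_foldl_sets {α : Type} (l : List α) (g : PySem.Set (Int × Int) → α → PySem.Set (Int × Int))
    (P : α → Int × Int → Prop)
    (hg : ∀ s x y, y ∈ g s x ↔ y ∈ s ∨ P x y) (s : PySem.Set (Int × Int)) (y : Int × Int) :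
    y ∈ l.foldl g s ↔ y ∈ s ∨ ∃ x ∈ l, P x y := by
  induction l generalizing s with
  | nil => simp
  | cons x xs ih =>
      rw [List.foldl_cons, ih, hg]
      simp only [List.mem_cons]
      constructor
      · rintro ((h | h) | ⟨z, hz, hp⟩)
        · exact Or.inl h
        · exact Or.inr ⟨x, Or.inl rfl, h⟩
        · exact Or.inr ⟨z, Or.inr hz, hp⟩
      · rintro (h | ⟨z, (rfl | hz), hp⟩)
        · exact Or.inl (Or.inl h)
        · exact Or.inl (Or.inr hp)
        · exact Or.inr ⟨z, hz, hp⟩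

theorem nodup_foldl_sets {α : Type} (l : List α)
    (g : PySem.Set (Int × Int) → α → PySem.Set (Int × Int))
    (hg : ∀ s x, s.Nodup → (g s x).Nodup) (s : PySem.Set (Int × Int)) (hs : s.Nodup) :
    (l.foldl g s).Nodup := by
  induction l generalizing s with
  | nil => exact hs
  | cons x xs ih => exact ih _ (hg s x hs)

theorem nodup_frontierSet (field : List (List Int)) : (frontierSet field).Nodup := by
  unfold frontierSet
  exact nodup_foldl_sets _ _ (fun s d hs => PySem.Set.nodup_union _ _ hs) _ List.nodup_nil

theorem mem_dirList (field : List (List Int)) (d : Int × Int) (y : Int × Int) :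
    y ∈ dirList field d ↔
      ∃ i, i < field.length ∧ ∃ j, j < (field.headD []).length ∧
        condB field d i j = true ∧ y = pairC i j := by
  unfold dirList pairC
  simp only [List.mem_flatMap, List.mem_map, List.mem_filter, List.mem_range]
  constructor
  · rintro ⟨i, hi, j, ⟨hj, hc⟩, rfl⟩; exact ⟨i, hi, j, hj, hc, rfl⟩
  · rintro ⟨i, hi, j, hj, hc, rfl⟩; exact ⟨i, hi, j, ⟨hj, hc⟩, rfl⟩

theorem mem_frontierSet (field : List (List Int)) (hpre : Pre_count_frontiers field) (y : Int × Int) :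
    y ∈ frontierSet field ↔
      ∃ i, i < field.length ∧ ∃ j, j < (field.headD []).length ∧
        ((field.getD i []).getD j 0 ≠ 0 ∧ afront field i j = true) ∧ y = pairC i j := by
  unfold frontierSet
  rw [mem_foldl_sets _ _ (fun d y => y ∈ dirList field d)
    (fun s d y => by rw [PySem.Set.mem_union, PySem.Set.mem_ofList]) _ y]
  simp only [List.not_mem_nil, false_or, PySem.Set.empty]
  constructor
  · rintro ⟨d, hd, hy⟩
    rw [mem_dirList] at hy
    obtain ⟨i, hi, j, hj, hc, rfl⟩ := hy
    exact ⟨i, hi, j, hj, (condB_exists_iff field hpre i j hi hj).mp ⟨d, hd, hc⟩, rfl⟩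
  · rintro ⟨i, hi, j, hj, hfr, rfl⟩
    obtain ⟨d, hd, hc⟩ := (condB_exists_iff field hpre i j hi hj).mpr hfr
    exact ⟨d, hd, (mem_dirList field d _).mpr ⟨i, hi, j, hj, hc, rfl⟩⟩

-- the black frontier stones as an explicit duplicate-free list of grid coordinates
def fbList (field : List (List Int)) : List (Int × Int) :=
  (List.range field.length).flatMap (fun i =>
    ((List.range (field.headD []).length).filter (fun j => pA field i j)).map (pairC i))

theorem mem_fbList (field : List (List Int)) (y : Int × Int) :
    y ∈ fbList field ↔
      ∃ i, i < field.length ∧ ∃ j, j < (field.headD []).length ∧ pA field i j = true ∧ y = pairC i j := by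
  unfold fbList
  simp only [List.mem_flatMap, List.mem_map, List.mem_filter, List.mem_range]
  constructor
  · rintro ⟨i, hi, j, ⟨hj, hp⟩, rfl⟩; exact ⟨i, hi, j, hj, hp, rfl⟩
  · rintro ⟨i, hi, j, hj, hp, rfl⟩; exact ⟨i, hi, j, ⟨hj, hp⟩, rfl⟩

theorem nodup_fbList (field : List (List Int)) : (fbList field).Nodup := by
  unfold fbList
  rw [List.nodup_flatMap]
  constructor
  · intro i _
    refine ((List.nodup_range).filter _).map (fun j1 j2 h => ?_)
    have := congrArg Prod.snd h
    simp [pairC] at this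
    exact this
  · refine List.pairwise_lt_range.imp ?_
    intro a b hab x hxa hxb
    simp only [List.mem_map, List.mem_filter, List.mem_range] at hxa hxb
    obtain ⟨j1, _, e1⟩ := hxa
    obtain ⟨j2, _, e2⟩ := hxb
    have h1 := congrArg Prod.fst e1
    have h2 := congrArg Prod.fst e2
    simp [pairC] at h1 h2
    omega

-- under Pre_, the filtered frontier set and fbList have the same members
theorem same_members (field : List (List Int)) (hpre : Pre_count_frontiers field) (y : Int × Int) :
    y ∈ (frontierSet field).filter
          (fun p => (field.getD p.1.toNat []).getD p.2.toNat 0 == 1) ↔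
    y ∈ fbList field := by
  rw [List.mem_filter, mem_frontierSet field hpre, mem_fbList]
  constructor
  · rintro ⟨⟨i, hi, j, hj, ⟨hnz, hafr⟩, rfl⟩, hblk⟩
    simp only [pairC, Int.toNat_natCast, beq_iff_eq] at hblk
    exact ⟨i, hi, j, hj, (pA_true_iff field i j).mpr ⟨hblk, hafr⟩, rfl⟩
  · rintro ⟨i, hi, j, hj, hp, rfl⟩
    obtain ⟨h1, hafr⟩ := (pA_true_iff field i j).mp hp
    refine ⟨⟨i, hi, j, hj, ⟨by rw [h1]; norm_num, hafr⟩, rfl⟩, ?_⟩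
    simp only [pairC, Int.toNat_natCast, beq_iff_eq]
    exact h1

theorem length_fbList (field : List (List Int)) :
    ((fbList field).length : Int) =
      ((List.range field.length).map (fun i =>
        ((List.range (field.headD []).length).map (fun j =>
          if pA field i j then (1 : Int) else 0)).sum)).sum := by
  unfold fbList
  rw [List.length_flatMap]
  induction (List.range field.length) with
  | nil => simp
  | cons x xs ih =>
      simp only [List.map_cons, List.sum_cons, Nat.cast_add, ih]
      congr 1
      rw [List.length_map, ← List.countP_eq_length_filter]
      induction (List.range (field.headD []).length) with
      | nil => simp
      | cons z zs ih2 =>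
          simp only [List.countP_cons, List.map_cons, List.sum_cons, ← ih2]
          by_cases h : pA field x z = true
          · simp [h]; ring
          · simp [h]

-- ===== VERDICT (by name: the statement is the Claim_ definition above) =====
theorem count_frontiers_spec : Claim_equal_count_frontiers := by
  intro field _ hpre
  unfold Spec_count_frontiers count_frontiers_alt
  rw [countA_eq field, ← length_fbList field]
  congr 1
  exact (List.Perm.length_eq
    ((List.perm_ext_iff_of_nodup
        ((nodup_frontierSet field).filter _) (nodup_fbList field)).mpr
      (same_members field hpre))).symm
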